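-- pv_equiv track=rewrite | github.com/karahug/Exercises | Hackerrank/Algorithms/Greedy/Permuting Two Arrays/permutingTwoArrays.py | minArrSums
-- ===== SOURCE A (Python) =====
-- def minArrSums(arr1, arr2, k):
-- 	arr1 = sorted(arr1)
-- 	arr2 = sorted(arr2)
-- 	added = []
-- 	for i in arr1:
-- 		success = False
-- 		for j in arr2:
-- 			if i+j >= k:
-- 				arr2.remove(j)
-- 				success = True
-- 				break
-- 		if not success:
-- 			return False
-- 	return True
-- ===== SOURCE B (Python) =====
-- def minArrSums(arr1, arr2, k):
--     a = sorted(arr1)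
--     b = sorted(arr2, reverse=True)
--     if len(a) > len(b):
--         return False
--     return all(x + y >= k for x, y in zip(a, b))
-- ===== Notes on version B (the rewrite author's own statement) =====
-- stated objective: simpler
-- what changed: Replaced the destructive greedy (for each element of sorted arr1, scan sorted arr2 for the first partner with sum >= k and remove it) by the classic sort-and-pair check: sort arr1 ascending, arr2 descending, and test arr1[i]+arr2[i] >= k pairwise.
import Mathlib
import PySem

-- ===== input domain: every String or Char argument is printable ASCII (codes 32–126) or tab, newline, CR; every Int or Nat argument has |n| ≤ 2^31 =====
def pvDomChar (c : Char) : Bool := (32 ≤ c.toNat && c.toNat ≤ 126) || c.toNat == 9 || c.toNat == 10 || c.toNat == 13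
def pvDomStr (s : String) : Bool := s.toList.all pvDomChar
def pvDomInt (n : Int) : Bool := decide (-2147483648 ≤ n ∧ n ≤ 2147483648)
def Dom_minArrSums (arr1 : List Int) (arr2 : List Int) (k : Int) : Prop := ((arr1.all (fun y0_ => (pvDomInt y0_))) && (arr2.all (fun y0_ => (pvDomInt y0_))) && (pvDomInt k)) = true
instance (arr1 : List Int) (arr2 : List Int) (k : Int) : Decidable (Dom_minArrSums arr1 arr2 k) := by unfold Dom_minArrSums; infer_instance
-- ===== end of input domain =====

-- B replaces A's destructive greedy (scan-and-remove the first workable partner in sorted arr2,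
-- per element of sorted arr1) by the classic sort-and-pair check: sort arr1 ascending, arr2
-- descending, test arr1[i]+arr2[i] >= k pairwise (simpler; same measured cost).  Only the return
-- value is compared (A mutates no caller-visible data: it rebinds arr1/arr2 to fresh sorted lists).

-- ===== PORT A =====
-- the for-loop over sorted arr1: inner loop = find first j in arr2 with i+j >= k, remove it
def minArrSumsGo (k : Int) : List Int → List Int → Bool
  | [], _ => true
  | i :: rest, arr2 =>
    match arr2.find? (fun j => decide (k ≤ i + j)) with
    | none => false                                   -- success stayed False: return False
    | some j =>
      match PySem.List.remove? arr2 j with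
      | none => false                                 -- unreachable: j was found in arr2
      | some arr2' => minArrSumsGo k rest arr2'

def minArrSums (arr1 : List Int) (arr2 : List Int) (k : Int) : Bool :=
  minArrSumsGo k (PySem.List.sorted arr1 (fun x => x) false) (PySem.List.sorted arr2 (fun x => x) false)

-- ===== PORT B =====
def minArrSums_alt (arr1 : List Int) (arr2 : List Int) (k : Int) : Bool :=
  let a := PySem.List.sorted arr1 (fun x => x) false
  let b := PySem.List.sorted arr2 (fun x => x) true
  if a.length > b.length then false
  else (a.zip b).all (fun p => decide (k ≤ p.1 + p.2))

-- ===== PRECONDITION & SPEC =====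
def Spec_minArrSums (arr1 : List Int) (arr2 : List Int) (k : Int) (out : Bool) : Prop := out = minArrSums_alt arr1 arr2 k
instance (arr1 : List Int) (arr2 : List Int) (k : Int) (out : Bool) : Decidable (Spec_minArrSums arr1 arr2 k out) := by unfold Spec_minArrSums; infer_instance

-- ===== CLAIM (what is proved, stated in full; the proofs are below) =====
def Claim_equal_minArrSums : Prop := ∀ (arr1 : List Int) (arr2 : List Int) (k : Int), Dom_minArrSums arr1 arr2 k → Spec_minArrSums arr1 arr2 k (minArrSums arr1 arr2 k)

-- ===== LEMMAS AND PROOFS =====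

-- feasibility of a value for every element of a list
def Feas (k : Int) (a : List Int) (v : Int) : Prop := ∀ z ∈ a, k ≤ z + v

-- remove?-by-found-value = eraseP, for a predicate on values
theorem remove_find_eq_eraseP (p : Int → Bool) (b : List Int) (j : Int)
    (h : b.find? p = some j) : PySem.List.remove? b j = some (b.eraseP p) := by
  induction b with
  | nil => simp at h
  | cons u bs ih =>
    by_cases hu : p u = true
    · rw [List.find?_cons_of_pos hu] at h
      injection h with h; subst h
      simp [PySem.List.remove?_cons_self, hu]
    · rw [List.find?_cons_of_neg (by simp [hu])] at h
      have hj : p j = true := List.find?_some h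
      have hne : u ≠ j := fun e => hu (e ▸ hj)
      rw [PySem.List.remove?_cons_of_ne bs hne, ih h]
      simp [hu]

-- one step of A's loop, in eraseP form
theorem minArrSumsGo_cons (k x : Int) (a b : List Int) :
    minArrSumsGo k (x :: a) b =
      (if b.any (fun j => decide (k ≤ x + j)) then minArrSumsGo k a (b.eraseP (fun j => decide (k ≤ x + j))) else false) := by
  simp only [minArrSumsGo]
  cases h : b.find? (fun j => decide (k ≤ x + j)) with
  | none =>
    have : b.any (fun j => decide (k ≤ x + j)) = false := by
      rw [List.any_eq_false]
      intro j hj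
      exact List.find?_eq_none.1 h j hj
    simp [this]
  | some j =>
    have hmem : j ∈ b := List.mem_of_find?_eq_some h
    have hj : decide (k ≤ x + j) = true := by simpa using List.find?_some h
    have hany : b.any (fun j => decide (k ≤ x + j)) = true := List.any_eq_true.2 ⟨j, hmem, hj⟩
    have hrm := remove_find_eq_eraseP _ _ _ h
    simp [hrm, hany]

-- helper: Forall₂ with an "all-right-R" second disjunct from lengths alone
theorem forall2_of_right (R : Int → Prop) (l₁ l₂ : List Int)
    (hlen : l₁.length = l₂.length) (hall : ∀ v ∈ l₂, R v) :
    List.Forall₂ (fun u v => u ≤ v ∨ R v) l₁ l₂ := by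
  induction l₁ generalizing l₂ with
  | nil => cases l₂ with
    | nil => exact List.Forall₂.nil
    | cons v vs => simp at hlen
  | cons u us ih =>
    cases l₂ with
    | nil => simp at hlen
    | cons v vs =>
      exact List.Forall₂.cons (Or.inr (hall v (by simp)))
        (ih vs (by simpa using hlen) (fun w hw => hall w (by simp [hw])))

-- a sorted list dominates its own tail shifted: dropLast vs tail
theorem forall2_dropLast_tail (l : List Int) (hs : l.Pairwise (· ≤ ·)) :
    List.Forall₂ (· ≤ ·) l.dropLast l.tail := by
  induction l with
  | nil => simp
  | cons x xs ih =>
    cases xs with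
    | nil => simp
    | cons y ys =>
      rcases List.pairwise_cons.1 hs with ⟨hx, hs2⟩
      rw [List.dropLast_cons₂, List.tail_cons]
      exact List.Forall₂.cons (hx y (by simp)) (ih hs2)

-- eraseP keeps a pointwise-larger list than dropLast (sorted, some element erased)
theorem eraseP_dominates (p : Int → Bool) (b : List Int)
    (hs : b.Pairwise (· ≤ ·)) (hany : b.any p = true) :
    List.Forall₂ (· ≤ ·) b.dropLast (b.eraseP p) := by
  induction b with
  | nil => simp
  | cons u bs ih =>
    rcases List.pairwise_cons.1 hs with ⟨hu, hs2⟩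
    by_cases hp : p u = true
    · simp only [List.eraseP_cons, hp, cond_true]
      cases bs with
      | nil => simp
      | cons v vs =>
        rw [List.dropLast_cons₂]
        exact List.Forall₂.cons (hu v (by simp)) (forall2_dropLast_tail _ hs2)
    · have hbs : bs.any p = true := by simpa [hp] using hany
      have hne : bs ≠ [] := by rintro rfl; simp at hbs
      simp only [List.eraseP_cons, hp, cond_false]
      rw [List.dropLast_cons_of_ne_nil hne]
      exact List.Forall₂.cons le_rfl (ih hs2 hbs)

-- and conversely, eraseP is below dropLast up to p-satisfying slots
theorem eraseP_dominated (p : Int → Bool) (b : List Int)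
    (hs : b.Pairwise (· ≤ ·)) (hany : b.any p = true)
    (hmono : ∀ u v : Int, u ≤ v → p u = true → p v = true) :
    List.Forall₂ (fun u v => u ≤ v ∨ p v = true) (b.eraseP p) b.dropLast := by
  induction b with
  | nil => simp
  | cons u bs ih =>
    rcases List.pairwise_cons.1 hs with ⟨hu, hs2⟩
    by_cases hp : p u = true
    · simp only [List.eraseP_cons, hp, cond_true]
      cases bs with
      | nil => simp
      | cons v vs =>
        rw [List.dropLast_cons₂]
        refine forall2_of_right _ _ _ ?_ ?_
        · simp [List.length_dropLast]
        · intro w hw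
          rcases List.mem_cons.1 hw with rfl | hw2
          · exact hp
          · exact hmono u w (hu w (List.mem_of_mem_dropLast hw2)) hp
    · have hbs : bs.any p = true := by simpa [hp] using hany
      have hne : bs ≠ [] := by rintro rfl; simp at hbs
      simp only [List.eraseP_cons, hp, cond_false]
      rw [List.dropLast_cons_of_ne_nil hne]
      exact List.Forall₂.cons (Or.inl le_rfl) (ih hs2 hbs)

-- core erasure lemma
theorem erase_rel (px : Int → Bool) (Fbig Fsmall : Int → Prop)
    (h1 : ∀ u v : Int, u ≤ v → px u = true → px v = true)
    (h2 : ∀ v, Fbig v → px v = true)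
    (h3 : ∀ v w : Int, v ≤ w → px v = true → Fsmall w)
    (h5 : ∀ v, Fbig v → Fsmall v) :
    ∀ c c' : List Int, c'.Pairwise (· ≤ ·) →
      List.Forall₂ (fun u v => u ≤ v ∨ Fbig v) c c' → c.any px = true →
      c'.any px = true ∧ List.Forall₂ (fun u v => u ≤ v ∨ Fsmall v) (c.eraseP px) (c'.eraseP px) := by
  intro c
  induction c with
  | nil => intro c2 _ _ hany; simp at hany
  | cons u cs ih =>
    intro c2 hp hrel hany
    cases c2 with
    | nil => cases hrel
    | cons v cs2 =>
      rcases List.forall₂_cons.1 hrel with ⟨hd, tl⟩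
      rcases List.pairwise_cons.1 hp with ⟨hv, hp2⟩
      by_cases hpu : px u = true
      · have hpv : px v = true := by
          rcases hd with h | h
          · exact h1 u v h hpu
          · exact h2 v h
        refine ⟨by simp [hpv], ?_⟩
        simp only [List.eraseP_cons, hpu, hpv, cond_true]
        exact tl.imp (fun a b hab => hab.imp_right (h5 b))
      · have hcs : cs.any px = true := by simpa [hpu] using hany
        by_cases hpv : px v = true
        · refine ⟨by simp [hpv], ?_⟩
          simp only [List.eraseP_cons, hpu, hpv, cond_true, cond_false]
          obtain ⟨w, hw, hpw⟩ := List.any_eq_true.1 hcs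
          refine forall2_of_right _ _ _ ?_ ?_
          · have h1l : (cs.eraseP px).length = cs.length - 1 :=
              List.length_eraseP_of_mem hw hpw
            have h2l : cs.length = cs2.length := tl.length_eq
            have h3l : 0 < cs.length := List.length_pos_of_mem hw
            simp only [List.length_cons, h1l, ← h2l]
            omega
          · intro w2 hw2
            exact h3 v w2 (hv w2 hw2) hpv
        · have hle : u ≤ v := by
            rcases hd with h | h
            · exact h
            · exact absurd (h2 v h) hpv
          obtain ⟨ha2, hf2⟩ := ih cs2 hp2 tl hcs
          refine ⟨by simp [ha2], ?_⟩
          simp only [List.eraseP_cons, hpu, hpv, cond_false]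
          exact List.Forall₂.cons (Or.inl hle) hf2

-- monotonicity of A's greedy in the second list
theorem greedy_mono (k : Int) : ∀ a : List Int, a.Pairwise (· ≤ ·) →
    ∀ c c' : List Int, c'.Pairwise (· ≤ ·) →
    List.Forall₂ (fun u v => u ≤ v ∨ Feas k a v) c c' →
    minArrSumsGo k a c = true → minArrSumsGo k a c' = true := by
  intro a
  induction a with
  | nil => intro _ c c2 _ _ _; simp [minArrSumsGo]
  | cons x a' ih =>
    intro hpa c c2 hpc2 hrel hgo
    rcases List.pairwise_cons.1 hpa with ⟨hx, hpa'⟩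
    rw [minArrSumsGo_cons] at hgo ⊢
    by_cases hany : c.any (fun j => decide (k ≤ x + j)) = true
    · rw [if_pos hany] at hgo
      obtain ⟨hany2, hrel2⟩ :=
        erase_rel (fun j => decide (k ≤ x + j)) (Feas k (x :: a')) (Feas k a')
          (fun u v huv hu => by simp only [decide_eq_true_eq] at hu ⊢; omega)
          (fun v hF => by simpa using hF x (by simp))
          (fun v w hvw hv z hz => by
            have := hx z hz
            simp only [decide_eq_true_eq] at hv
            omega)
          (fun v hF z hz => hF z (by simp [hz]))
          c c2 hpc2 hrel hany
      rw [if_pos hany2]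
      exact ih hpa' _ _ (hpc2.sublist List.eraseP_sublist) hrel2 hgo
    · rw [if_neg hany] at hgo
      simp at hgo

-- main characterisation: the greedy equals the sorted pairwise check
theorem greedy_eq_check (k : Int) : ∀ a : List Int, a.Pairwise (· ≤ ·) →
    ∀ b : List Int, b.Pairwise (· ≤ ·) →
    minArrSumsGo k a b =
      (decide (a.length ≤ b.length) && (a.zip b.reverse).all (fun p => decide (k ≤ p.1 + p.2))) := by
  intro a
  induction a with
  | nil => intro _ b _; simp [minArrSumsGo]
  | cons x a' ih =>
    intro hpa b hpb
    rcases List.pairwise_cons.1 hpa with ⟨hx, hpa'⟩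
    cases hbe : b with
    | nil => subst hbe; simp [minArrSumsGo]
    | cons b0 bs =>
      have hne : b ≠ [] := by simp [hbe]
      have hDpb : b.dropLast.Pairwise (· ≤ ·) := hpb.sublist (List.dropLast_sublist b)
      have hrev : b.reverse = b.getLast hne :: b.dropLast.reverse := by
        conv_lhs => rw [← List.dropLast_append_getLast hne]
        simp
      have hlast_mem : b.getLast hne ∈ b := List.getLast_mem hne
      have hle_last : ∀ j ∈ b, j ≤ b.getLast hne := by
        intro j hj
        have hjrev : j ∈ b.reverse := by simpa using hj
        rw [hrev] at hjrev
        rcases List.mem_cons.1 hjrev with rfl | hjrev2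
        · exact le_rfl
        · have hrp : b.reverse.Pairwise (fun a b => b ≤ a) :=
            List.pairwise_reverse.2 hpb
          rw [hrev] at hrp
          exact (List.pairwise_cons.1 hrp).1 j hjrev2
      rw [← hbe, hrev, minArrSumsGo_cons]
      by_cases hany : b.any (fun j => decide (k ≤ x + j)) = true
      · obtain ⟨j, hj, hpj⟩ := List.any_eq_true.1 hany
        have hpL : decide (k ≤ x + b.getLast hne) = true := by
          simp only [decide_eq_true_eq] at hpj ⊢
          have := hle_last j hj
          omega
        have hlenD : b.dropLast.length = b.length - 1 := List.length_dropLast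
        have hlenb : 0 < b.length := List.length_pos_of_mem hlast_mem
        have hIH := ih hpa' b.dropLast hDpb
        have hRHS : (decide ((x :: a').length ≤ b.length) &&
            ((x :: a').zip (b.getLast hne :: b.dropLast.reverse)).all (fun p => decide (k ≤ p.1 + p.2)))
            = minArrSumsGo k a' b.dropLast := by
          simp only [List.zip_cons_cons, List.all_cons, List.length_cons]
          rw [hpL, Bool.true_and]
          have hiff : a'.length + 1 ≤ b.length ↔ a'.length ≤ b.dropLast.length := by
            omega
          simp only [hiff]
          exact hIH.symm
        rw [if_pos hany, hRHS]
        have hdir1 : minArrSumsGo k a' (b.eraseP (fun j => decide (k ≤ x + j))) = true →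
            minArrSumsGo k a' b.dropLast = true := by
          intro h
          refine greedy_mono k a' hpa' _ _ hDpb ?_ h
          refine (eraseP_dominated _ _ hpb hany ?_).imp ?_
          · intro u v huv hu
            simp only [decide_eq_true_eq] at hu ⊢
            omega
          · intro u v hab
            refine hab.imp_right ?_
            intro hpv z hz
            have := hx z hz
            simp only [decide_eq_true_eq] at hpv
            omega
        have hdir2 : minArrSumsGo k a' b.dropLast = true →
            minArrSumsGo k a' (b.eraseP (fun j => decide (k ≤ x + j))) = true := by
          intro h
          refine greedy_mono k a' hpa' _ _ (hpb.sublist List.eraseP_sublist) ?_ h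
          exact (eraseP_dominates _ _ hpb hany).imp (fun a b hab => Or.inl hab)
        rw [Bool.eq_iff_iff]
        exact ⟨fun h => hdir1 h, fun h => hdir2 h⟩
      · rw [if_neg hany]
        have hpL : decide (k ≤ x + b.getLast hne) = false := by
          have hf : b.any (fun j => decide (k ≤ x + j)) = false := Bool.eq_false_iff.mpr hany
          exact Bool.eq_false_iff.mpr (List.any_eq_false.1 hf _ hlast_mem)
        rw [List.zip_cons_cons, List.all_cons, hpL]
        simp

-- sorted descending = reverse of sorted ascending (identity key on Int)
theorem sorted_rev_eq_reverse (xs : List Int) :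
    PySem.List.sorted xs (fun x => x) true = (PySem.List.sorted xs (fun x => x) false).reverse := by
  refine List.Perm.eq_of_pairwise (le := fun a b : Int => b ≤ a)
    (fun a b _ _ h h' => le_antisymm h' h)
    (PySem.List.sorted_pairwise_rev (xs := xs) (key := fun x : Int => x))
    (List.pairwise_reverse.2 (PySem.List.sorted_pairwise (xs := xs) (key := fun x : Int => x)))
    ((PySem.List.sorted_perm xs (fun x => x) true).trans
      ((PySem.List.sorted_perm xs (fun x => x) false).symm.trans (List.reverse_perm _).symm))

-- ===== VERDICT (by name: the statement is the Claim_ definition above) =====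
theorem minArrSums_spec : Claim_equal_minArrSums := by
  intro arr1 arr2 k _
  unfold Spec_minArrSums minArrSums minArrSums_alt
  rw [sorted_rev_eq_reverse]
  have hs1 := PySem.List.sorted_pairwise (xs := arr1) (key := fun x : Int => x)
  have hs2 := PySem.List.sorted_pairwise (xs := arr2) (key := fun x : Int => x)
  rw [greedy_eq_check k _ hs1 _ hs2]
  simp only [List.length_reverse, gt_iff_lt]
  by_cases h : (PySem.List.sorted arr1 (fun x => x) false).length ≤ (PySem.List.sorted arr2 (fun x => x) false).length
  · rw [if_neg (by omega), decide_eq_true h, Bool.true_and]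
  · rw [if_pos (by omega), decide_eq_false (by omega), Bool.false_and]
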